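-- pv_equiv track=rewrite | github.com/gggg8657/study | coding_test/SECUI_PREPARANCE/atom.py | synthesis
-- ===== SOURCE A (Python) =====
-- from collections import defaultdict, deque
--
-- def synthesis(atoms):
--     new_atoms = []
--     grid = defaultdict(list)
--
--     # 각 위치별 원자 그룹화
--     for atom in atoms:
--         grid[(atom[0], atom[1])].append(atom)
--
--     # 그룹화된 원자 처리
--     for (x, y), atom_list in grid.items():
--         if len(atom_list) == 1:
--             new_atoms.append(atom_list[0])  # 합성 불필요
--         else:
--             total_mass = sum(a[2] for a in atom_list)
--             total_speed = sum(a[3] for a in atom_list)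
--             direction_flag = all(a[4] % 2 == atom_list[0][4] % 2 for a in atom_list)
--             count = len(atom_list)
--
--             new_mass = total_mass // 5
--             new_speed = total_speed // count
--
--             if new_mass > 0:  # 질량이 0이면 소멸
--                 for i in range(4):
--                     new_direction = i * 2 if direction_flag else i * 2 + 1
--                     new_atoms.append([x, y, new_mass, new_speed, new_direction])
--
--     return new_atoms
-- ===== SOURCE B (Python) =====
-- def synthesis(atoms):
--     # One pass: accumulate per-position record [first_atom, count, total_mass,
--     # total_speed, base_parity, all_parities_match]; synthesis fields are only
--     # touched once a position actually has a second atom.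
--     groups = {}
--     for atom in atoms:
--         key = (atom[0], atom[1])
--         rec = groups.get(key)
--         if rec is None:
--             groups[key] = [atom, 1, 0, 0, 0, True]
--         elif rec[1] == 1:
--             first = rec[0]
--             rec[1] = 2
--             rec[2] = first[2] + atom[2]
--             rec[3] = first[3] + atom[3]
--             rec[4] = first[4] % 2
--             rec[5] = atom[4] % 2 == rec[4]
--         else:
--             rec[1] += 1
--             rec[2] += atom[2]
--             rec[3] += atom[3]
--             rec[5] = rec[5] and atom[4] % 2 == rec[4]
--     out = []
--     for (x, y), (first, cnt, tm, ts, _p0, flag) in groups.items():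
--         if cnt == 1:
--             out.append(first)
--         else:
--             nm = tm // 5
--             if nm > 0:
--                 ns = ts // cnt
--                 for i in range(4):
--                     out.append([x, y, nm, ns, i * 2 if flag else i * 2 + 1])
--     return out
-- ===== Notes on version B (the rewrite author's own statement) =====
-- stated objective: alternative
-- what changed: B replaces A's two-phase group-by-position (dict of atom lists, then a second pass with three scans per group for mass/speed/parity) by a single accumulating pass that keeps per position only (first atom, count, total mass, total speed, base parity, parity flag), then emits directly from the accumulators.
import Mathlib
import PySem

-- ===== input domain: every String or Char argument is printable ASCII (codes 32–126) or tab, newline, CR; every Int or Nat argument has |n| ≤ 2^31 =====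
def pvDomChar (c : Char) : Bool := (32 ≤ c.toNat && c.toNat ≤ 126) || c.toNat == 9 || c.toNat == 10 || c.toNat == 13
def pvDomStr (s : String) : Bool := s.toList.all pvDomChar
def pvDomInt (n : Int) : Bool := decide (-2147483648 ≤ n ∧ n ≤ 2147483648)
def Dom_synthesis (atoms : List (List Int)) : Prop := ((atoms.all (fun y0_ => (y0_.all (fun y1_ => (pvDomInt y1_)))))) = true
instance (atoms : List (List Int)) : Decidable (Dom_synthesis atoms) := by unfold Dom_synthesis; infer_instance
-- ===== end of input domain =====

-- B folds A's whole per-group reduction (mass/speed/parity sums, three scans per group)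
-- into the single grouping pass, keeping one small accumulator record per position
-- (objective: alternative one-pass decomposition, same asymptotic cost).

-- ===== PORT A =====
-- Total read of atom[i] (default 0): exact on inputs admitted by Pre_synthesis,
-- where every index actually read is in range.
def pg (a : List Int) (i : Int) : Int := (PySem.List.pyGet? a i).getD 0

-- grid[(atom[0], atom[1])].append(atom)  (defaultdict(list))
def stepA (d : PySem.Dict (Int × Int) (List (List Int))) (a : List Int) :
    PySem.Dict (Int × Int) (List (List Int)) :=
  d.modify (pg a 0, pg a 1) [] (· ++ [a])

-- the body of A's second loop for one (key, atom_list) item;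
-- atom_list[0] is lst.headD [] — exact since every grid value is nonempty.
def synthGroup (p : (Int × Int) × List (List Int)) : List (List Int) :=
  let lst := p.2
  if lst.length = 1 then [lst.headD []]
  else
    let tm := (lst.map (fun a => pg a 2)).sum
    let ts := (lst.map (fun a => pg a 3)).sum
    let flag := lst.all (fun a => PySem.Int.mod (pg a 4) 2 == PySem.Int.mod (pg (lst.headD []) 4) 2)
    let cnt : Int := lst.length
    let nm := PySem.Int.floordiv tm 5
    let ns := PySem.Int.floordiv ts cnt
    if 0 < nm then
      (PySem.List.pyRange 0 4 1).map (fun i => [p.1.1, p.1.2, nm, ns, if flag then i * 2 else i * 2 + 1])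
    else []

def synthesis (atoms : List (List Int)) : List (List Int) :=
  ((atoms.foldl stepA PySem.Dict.empty).items).foldl (fun out p => out ++ synthGroup p) []

-- ===== PORT B =====
-- record: (first_atom, count, total_mass, total_speed, base_parity, parity_flag)
def stepB (d : PySem.Dict (Int × Int) (List Int × Int × Int × Int × Int × Bool)) (a : List Int) :
    PySem.Dict (Int × Int) (List Int × Int × Int × Int × Int × Bool) :=
  let k := (pg a 0, pg a 1)
  match d.get? k with
  | none => d.insert k (a, 1, 0, 0, 0, true)
  | some (fst, c, tm, ts, p, f) =>
    if c = 1 then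
      d.insert k (fst, 2, pg fst 2 + pg a 2, pg fst 3 + pg a 3, PySem.Int.mod (pg fst 4) 2,
        PySem.Int.mod (pg a 4) 2 == PySem.Int.mod (pg fst 4) 2)
    else
      d.insert k (fst, c + 1, tm + pg a 2, ts + pg a 3, p, f && (PySem.Int.mod (pg a 4) 2 == p))

def emitB (p : (Int × Int) × (List Int × Int × Int × Int × Int × Bool)) : List (List Int) :=
  match p with
  | ((x, y), (fst, c, tm, ts, _, f)) =>
    if c = 1 then [fst]
    else
      let nm := PySem.Int.floordiv tm 5
      if 0 < nm then
        let ns := PySem.Int.floordiv ts c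
        (PySem.List.pyRange 0 4 1).map (fun i => [x, y, nm, ns, if f then i * 2 else i * 2 + 1])
      else []

def synthesis_alt (atoms : List (List Int)) : List (List Int) :=
  ((atoms.foldl stepB PySem.Dict.empty).items).foldl (fun out p => out ++ emitB p) []

-- ===== PRECONDITION & SPEC =====
-- Pre_ excludes exactly the inputs where Python A raises IndexError: an atom of
-- length < 2 (atom[0]/atom[1] in the grouping loop), or an atom of length < 5
-- whose (x, y) position occurs at least twice (atom[2..4] in the merge branch).
def Pre_synthesis (atoms : List (List Int)) : Prop :=
  ∀ a ∈ atoms, 2 ≤ a.length ∧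
    (2 ≤ atoms.countP (fun b =>
        (PySem.List.pyGet? b 0, PySem.List.pyGet? b 1)
          == (PySem.List.pyGet? a 0, PySem.List.pyGet? a 1)) → 5 ≤ a.length)
instance (atoms : List (List Int)) : Decidable (Pre_synthesis atoms) := by unfold Pre_synthesis; infer_instance

def pvWitness_synthesis : List (List Int) := [[1, 2, 7, 3, 4], [1, 2, 8, 5, 6], [0, 0]]

def Spec_synthesis (atoms : List (List Int)) (out : List (List Int)) : Prop := out = synthesis_alt atoms
instance (atoms : List (List Int)) (out : List (List Int)) : Decidable (Spec_synthesis atoms out) := by unfold Spec_synthesis; infer_instance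

-- ===== CLAIM (what is proved, stated in full; the proofs are below) =====
def Claim_equal_synthesis : Prop := ∀ (atoms : List (List Int)), Dom_synthesis atoms → Pre_synthesis atoms → Spec_synthesis atoms (synthesis atoms)

-- ===== LEMMAS AND PROOFS =====

-- the accumulator record B keeps for a (nonempty) group list of A's grid
def recOf (lst : List (List Int)) : List Int × Int × Int × Int × Int × Bool :=
  if lst.length = 1 then (lst.headD [], 1, 0, 0, 0, true)
  else
    (lst.headD [], (lst.length : Int),
     (lst.map (fun a => pg a 2)).sum,
     (lst.map (fun a => pg a 3)).sum,
     PySem.Int.mod (pg (lst.headD []) 4) 2,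
     lst.all (fun a => PySem.Int.mod (pg a 4) 2 == PySem.Int.mod (pg (lst.headD []) 4) 2))

def gRec (p : (Int × Int) × List (List Int)) : (Int × Int) × (List Int × Int × Int × Int × Int × Bool) :=
  (p.1, recOf p.2)

theorem get?_map_rec (d : PySem.Dict (Int × Int) (List (List Int))) (k : Int × Int) :
    (PySem.Dict.mk (d.items.map gRec)).get? k = (d.get? k).map recOf := by
  simp only [PySem.Dict.get?, List.find?_map, Option.map_map]; rfl

theorem recOf_append (lst : List (List Int)) (a : List Int) (h : lst ≠ []) :
    recOf (lst ++ [a]) =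
      (match recOf lst with
       | (fst, c, tm, ts, p, f) =>
         if c = 1 then
           (fst, 2, pg fst 2 + pg a 2, pg fst 3 + pg a 3, PySem.Int.mod (pg fst 4) 2,
             PySem.Int.mod (pg a 4) 2 == PySem.Int.mod (pg fst 4) 2)
         else
           (fst, c + 1, tm + pg a 2, ts + pg a 3, p, f && (PySem.Int.mod (pg a 4) 2 == p))) := by
  obtain ⟨x, t, rfl⟩ := List.exists_cons_of_ne_nil h
  cases t with
  | nil => simp [recOf]
  | cons b t' =>
    simp only [recOf, List.cons_append, List.length_cons, List.length_append,
      List.headD_cons, List.map_cons, List.map_append, List.all_cons, List.all_append,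
      List.sum_append, List.map_nil, List.all_nil, List.sum_cons, List.sum_nil]
    norm_num
    rw [if_neg (by omega)]
    simp only [Prod.mk.injEq]
    exact ⟨trivial, trivial, by ring, by ring, trivial, (Bool.and_assoc ..).symm⟩

theorem insert_rel (dA : PySem.Dict (Int × Int) (List (List Int))) (k : Int × Int)
    (lst : List (List Int)) (a : List Int)
    (hA : dA.get? k = some lst)
    (vB : List Int × Int × Int × Int × Int × Bool) (hvB : vB = recOf (lst ++ [a])) :
    ((PySem.Dict.mk (dA.items.map gRec)).insert k vB).items
      = ((dA.insert k (lst ++ [a])).items).map gRec := by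
  have hc1 : dA.contains k = true := by
    rw [PySem.Dict.contains_eq_isSome_get?, hA]; rfl
  have hc2 : (PySem.Dict.mk (dA.items.map gRec)).contains k = true := by
    rw [PySem.Dict.contains_eq_isSome_get?, get?_map_rec, hA]; rfl
  rw [PySem.Dict.items_insert_of_contains _ _ hc2, PySem.Dict.items_insert_of_contains _ _ hc1]
  show (dA.items.map gRec).map _ = (dA.items.map _).map gRec
  rw [List.map_map, List.map_map]
  apply List.map_congr_left
  intro p _
  by_cases hp : p.1 == k <;> simp [gRec, hp, hvB, Function.comp]

theorem step_rel (dA : PySem.Dict (Int × Int) (List (List Int)))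
    (a : List Int)
    (hne : ∀ p ∈ dA.items, p.2 ≠ []) :
    (stepB (PySem.Dict.mk (dA.items.map gRec)) a).items = (stepA dA a).items.map gRec := by
  have hget := get?_map_rec dA (pg a 0, pg a 1)
  cases hA : dA.get? (pg a 0, pg a 1) with
  | none =>
    have hcf : dA.contains (pg a 0, pg a 1) = false := by
      rw [PySem.Dict.contains_eq_isSome_get?, hA]; rfl
    have hcf2 : (PySem.Dict.mk (dA.items.map gRec)).contains (pg a 0, pg a 1) = false := by
      rw [PySem.Dict.contains_eq_isSome_get?, hget, hA]; rfl
    rw [hA] at hget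
    simp only [stepB, hget, Option.map_none]
    simp only [stepA, PySem.Dict.modify, PySem.Dict.getD, hA]
    rw [PySem.Dict.items_insert_of_not_contains _ _ hcf2,
        PySem.Dict.items_insert_of_not_contains _ _ hcf]
    simp [gRec, recOf]
  | some lst =>
    have hlne : lst ≠ [] := (hne _ (PySem.Dict.mem_items_of_get?_eq_some dA hA))
    rcases hrec : recOf lst with ⟨f0, c, tm, ts, p0, fl⟩
    rw [hA, Option.map_some, hrec] at hget
    simp only [stepB, hget]
    simp only [stepA, PySem.Dict.modify, PySem.Dict.getD, hA, Option.getD_some]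
    have hr := recOf_append lst a hlne
    rw [hrec] at hr
    by_cases hc : c = 1
    · rw [if_pos hc]
      exact insert_rel dA _ lst a hA _ (by rw [hr]; simp [hc])
    · rw [if_neg hc]
      exact insert_rel dA _ lst a hA _ (by rw [hr]; simp [hc])

theorem step_ne (dA : PySem.Dict (Int × Int) (List (List Int))) (a : List Int)
    (hne : ∀ p ∈ dA.items, p.2 ≠ []) :
    ∀ p ∈ (stepA dA a).items, p.2 ≠ [] := by
  intro p hp
  simp only [stepA, PySem.Dict.modify] at hp
  rcases (PySem.Dict.mem_items_insert _ _ _ _).mp hp with h | ⟨h, _⟩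
  · subst h; simp
  · exact hne _ h

theorem build_rel (atoms : List (List Int)) :
    ∀ (dA : PySem.Dict (Int × Int) (List (List Int)))
      (dB : PySem.Dict (Int × Int) (List Int × Int × Int × Int × Int × Bool)),
      dB.items = dA.items.map gRec → (∀ p ∈ dA.items, p.2 ≠ []) →
      (atoms.foldl stepB dB).items = (atoms.foldl stepA dA).items.map gRec ∧
        ∀ p ∈ (atoms.foldl stepA dA).items, p.2 ≠ [] := by
  induction atoms with
  | nil => intro dA dB h hne; exact ⟨h, hne⟩
  | cons a rest ih =>
    intro dA dB h hne
    have hdB : dB = PySem.Dict.mk (dA.items.map gRec) := PySem.Dict.ext h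
    subst hdB
    exact ih (stepA dA a) _ (step_rel dA a hne) (step_ne dA a hne)

theorem emit_eq (p : (Int × Int) × List (List Int)) (hne : p.2 ≠ []) :
    emitB (gRec p) = synthGroup p := by
  obtain ⟨⟨x, y⟩, lst⟩ := p
  by_cases h1 : lst.length = 1
  · simp [emitB, synthGroup, gRec, recOf, h1]
  · have h1' : ((lst.length : Int)) ≠ 1 := by exact_mod_cast h1
    simp [emitB, synthGroup, gRec, recOf, h1, h1']

-- ===== VERDICT (by name: the statement is the Claim_ definition above) =====
theorem synthesis_spec : Claim_equal_synthesis := by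
  intro atoms _hdom _hpre
  unfold Spec_synthesis synthesis synthesis_alt
  obtain ⟨hitems, hne⟩ := build_rel atoms PySem.Dict.empty PySem.Dict.empty rfl (by simp [PySem.Dict.empty])
  rw [PySem.List.foldl_append_eq_flatMap, PySem.List.foldl_append_eq_flatMap, hitems]
  simp only [List.nil_append, List.flatMap_map]
  exact (List.flatMap_congr (fun p hp => emit_eq p (hne p hp))).symm
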